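-- pv_equiv track=rewrite | github.com/Aasthaengg/IBMdataset | Python_codes/p03687/s489942184.py | solve
-- ===== SOURCE A (Python) =====
-- def solve(a, s):
--     b = []
--     for i in range(len(s)):
--         if s[i] == a:
--             b.append(i)
--     if len(b) == 0:
--         return len(s) - 1
--     ans = 0
--     for i in range(len(b)-1):
--         ans = max(ans, (b[i+1] - b[i] - 1))
--     ans = max(ans, b[0])
--     ans = max(ans, len(s) - b[-1] - 1)
--     return ans
-- ===== SOURCE B (Python) =====
-- def solve(a, s):
--     last = -1
--     seen = False
--     best = 0
--     for i, ch in enumerate(s):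
--         if ch == a:
--             g = i - last - 1
--             if g > best:
--                 best = g
--             last = i
--             seen = True
--     if not seen:
--         return len(s) - 1
--     tail = len(s) - last - 1
--     return best if best > tail else tail
-- ===== Notes on version B (the rewrite author's own statement) =====
-- stated objective: simpler
-- what changed: Replaces the build-index-list-then-rescan shape with a single pass over the string that maintains only the previous match position and a running maximum gap, never materializing the position list.
import Mathlib
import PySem

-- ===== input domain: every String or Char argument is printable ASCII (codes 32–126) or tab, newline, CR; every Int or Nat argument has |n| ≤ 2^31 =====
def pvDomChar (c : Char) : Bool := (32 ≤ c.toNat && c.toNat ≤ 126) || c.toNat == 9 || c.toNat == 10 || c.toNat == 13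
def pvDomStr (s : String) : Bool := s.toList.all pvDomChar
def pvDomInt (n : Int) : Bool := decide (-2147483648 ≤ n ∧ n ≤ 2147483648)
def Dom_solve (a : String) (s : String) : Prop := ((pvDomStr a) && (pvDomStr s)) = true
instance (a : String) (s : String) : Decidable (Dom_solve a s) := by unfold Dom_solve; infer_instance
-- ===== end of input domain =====

-- B replaces A's build-position-list-then-rescan with a single pass keeping only the
-- previous match position and a running maximum gap (objective: simpler decomposition).

-- ===== PORT A =====
def solve (a : String) (s : String) : Int :=
  let cs := s.toList
  let b : List Int := (PySem.List.pyRange 0 (PySem.List.len cs) 1).foldl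
    (fun b i => if [PySem.List.pyGetD cs i ' '] = a.toList then b ++ [i] else b) []
  if b.length = 0 then PySem.List.len cs - 1
  else
    let ans : Int := (PySem.List.pyRange 0 (PySem.List.len b - 1) 1).foldl
      (fun ans i => max ans (PySem.List.pyGetD b (i + 1) 0 - PySem.List.pyGetD b i 0 - 1)) 0
    let ans := max ans (PySem.List.pyGetD b 0 0)
    max ans (PySem.List.len cs - PySem.List.pyGetD b (-1) 0 - 1)

-- ===== PORT B =====
def solve_alt (a : String) (s : String) : Int :=
  let cs := s.toList
  let st := (PySem.List.enumerate cs).foldl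
    (fun (st : Int × Bool × Int) (p : Int × Char) =>
      if [p.2] = a.toList then
        (p.1, true, if p.1 - st.1 - 1 > st.2.2 then p.1 - st.1 - 1 else st.2.2)
      else st)
    (-1, false, 0)
  if st.2.1 = false then PySem.List.len cs - 1
  else if st.2.2 > PySem.List.len cs - st.1 - 1 then st.2.2
  else PySem.List.len cs - st.1 - 1

-- ===== PRECONDITION & SPEC =====
def Spec_solve (a : String) (s : String) (out : Int) : Prop := out = solve_alt a s
instance (a : String) (s : String) (out : Int) : Decidable (Spec_solve a s out) := by unfold Spec_solve; infer_instance

-- ===== CLAIM (what is proved, stated in full; the proofs are below) =====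
def Claim_equal_solve : Prop := ∀ (a : String) (s : String), Dom_solve a s → Spec_solve a s (solve a s)

-- ===== LEMMAS AND PROOFS =====

-- the consecutive gaps b[i+1]-b[i]-1 of a position list, structurally
def gapsL : List Int → List Int
  | x :: y :: t => (y - x - 1) :: gapsL (y :: t)
  | _ => []

theorem gapsL_snoc (q : List Int) (hq : q ≠ []) (x : Int) :
    gapsL (q ++ [x]) = gapsL q ++ [x - q.getLast hq - 1] := by
  induction q with
  | nil => cases hq rfl
  | cons y t ih =>
    cases t with
    | nil => simp [gapsL]
    | cons z t' =>
      have h := ih (by simp)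
      simp only [List.cons_append] at h ⊢
      simp only [gapsL, h]
      simp [List.getLast]

theorem foldl_max_comm (l : List Int) (a c : Int) :
    l.foldl max (max a c) = max (l.foldl max a) c := by
  induction l generalizing a with
  | nil => rfl
  | cons x t ih => simpa [List.foldl, max_right_comm a c x] using ih (max a x)

theorem if_max (g b : Int) : (if g > b then g else b) = max b g := by
  split_ifs <;> omega

-- B's per-position step, after the character filter is peeled off
def stepP (st : Int × Bool × Int) (i : Int) : Int × Bool × Int :=
  (i, true, if i - st.1 - 1 > st.2.2 then i - st.1 - 1 else st.2.2)

theorem stF_spec (q : List Int) (hq : q ≠ []) :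
    q.foldl stepP (-1, false, 0)
      = (q.getLast hq, true, List.foldl max 0 (q.head hq :: gapsL q)) := by
  induction q using List.reverseRecOn with
  | nil => cases hq rfl
  | append_singleton t x ih =>
    cases t with
    | nil => simp [stepP, gapsL, if_max]
    | cons y t' =>
      rw [List.foldl_append, ih (by simp)]
      simp only [stepP, List.foldl_cons, List.foldl_nil, if_max]
      rw [gapsL_snoc (y :: t') (by simp) x]
      simp [List.foldl_append, List.foldl]

theorem mapRange_gaps (q : List Int) :
    (List.range (q.length - 1)).map (fun k => q.getD (k + 1) 0 - q.getD k 0 - 1) = gapsL q := by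
  induction q with
  | nil => simp [gapsL]
  | cons y t ih =>
    cases t with
    | nil => simp [gapsL]
    | cons z t' =>
      have hlen : (y :: z :: t').length - 1 = t'.length + 1 := by simp
      rw [hlen, List.range_succ_eq_map, List.map_cons, List.map_map]
      have hc : ((fun k => (y :: z :: t').getD (k + 1) 0 - (y :: z :: t').getD k 0 - 1) ∘ Nat.succ)
          = (fun k => (z :: t').getD (k + 1) 0 - (z :: t').getD k 0 - 1) := by
        funext k; rfl
      have hlen2 : (z :: t').length - 1 = t'.length := by simp
      rw [hc, show t'.length = (z :: t').length - 1 from hlen2.symm, ih]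
      simp [gapsL]

-- A's index-loop over b equals the running max over the structural gap list
theorem loopA_eq (q : List Int) :
    (PySem.List.pyRange 0 (PySem.List.len q - 1) 1).foldl
      (fun ans i => max ans (PySem.List.pyGetD q (i + 1) 0 - PySem.List.pyGetD q i 0 - 1)) 0
    = List.foldl max 0 (gapsL q) := by
  rw [PySem.List.pyRange_one, List.foldl_map]
  have ht : ((PySem.List.len q - 1) - 0).toNat = q.length - 1 := by
    simp [PySem.List.len_eq]
  rw [ht]
  have hfun : (fun (ans : Int) (k : Nat) =>
        max ans (PySem.List.pyGetD q (0 + (k : Int) + 1) 0 - PySem.List.pyGetD q (0 + (k : Int)) 0 - 1))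
      = (fun (ans : Int) (k : Nat) => max ans (q.getD (k + 1) 0 - q.getD k 0 - 1)) := by
    funext ans k
    have h1 : (0 : Int) + (k : Int) + 1 = ((k + 1 : Nat) : Int) := by push_cast; ring
    have h2 : (0 : Int) + (k : Int) = ((k : Nat) : Int) := by ring
    rw [h1, h2, PySem.List.pyGetD_natCast, PySem.List.pyGetD_natCast]
  rw [hfun, ← List.foldl_map, mapRange_gaps]

theorem solve_spec : Claim_equal_solve := by
  intro a s _
  unfold Spec_solve
  simp only [solve, solve_alt]
  rw [PySem.List.enumerate_eq_map_pyRange s.toList ' ', List.foldl_map]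
  rw [PySem.List.foldl_append_ite (fun i => [PySem.List.pyGetD s.toList i ' '] = a.toList)
        (fun i => i)]
  dsimp only
  rw [PySem.List.foldl_ite_eq_foldl_filter
        (fun i => [PySem.List.pyGetD s.toList i ' '] = a.toList)
        (fun (st : Int × Bool × Int) (i : Int) =>
          (i, true, if i - st.1 - 1 > st.2.2 then i - st.1 - 1 else st.2.2))]
  rw [show (fun (st : Int × Bool × Int) (i : Int) =>
          (i, true, if i - st.1 - 1 > st.2.2 then i - st.1 - 1 else st.2.2)) = stepP from rfl]
  rw [List.map_id']
  simp only [List.nil_append]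
  generalize (List.filter (fun i => decide ([PySem.List.pyGetD s.toList i ' '] = a.toList))
      (PySem.List.pyRange 0 (PySem.List.len s.toList))) = q
  rcases eq_or_ne q [] with h | h
  · simp [h]
  · obtain ⟨y, t, rfl⟩ := List.exists_cons_of_ne_nil h
    rw [stF_spec (y :: t) (by simp)]
    simp only [List.length_cons, Nat.succ_ne_zero, if_false]
    rw [loopA_eq, PySem.List.pyGetD_zero, PySem.List.pyGetD_neg_one _ _ (by simp)]
    simp only [List.getD_cons_zero, List.head_cons, Bool.true_eq_false, if_false, if_max]
    rw [show List.foldl max 0 (y :: gapsL (y :: t)) = List.foldl max (max 0 y) (gapsL (y :: t)) from rfl,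
        foldl_max_comm]
    rw [max_comm]
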